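-- pv_equiv track=rewrite | github.com/edanparker/Engineering-Wellness-Centre-Shift-Log-Generator | fileOrganizer.py | consolidateEntries
-- ===== SOURCE A (Python) =====
-- def consolidateEntries(xAxisTemp,yAxisTemp):
--     #init
--     xAxis = []
--     yAxis = []
--     mymatrix = []
--     yAxis.append(yAxisTemp[0])
--     xAxis.append(xAxisTemp[0])
--     counter = 1
--     #iterate through xAxisTemp
--     for l in xAxisTemp[1:]:
--         #will catch any entries of xAxisTemp that have already been entered into xAxis
--         if l in xAxis:
--             existingNum = yAxis[xAxis.index(l)]
--             yAxis[xAxis.index(l)] = existingNum + yAxisTemp[counter]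
--             counter += 1
--         #will catch all unique entries
--         else:
--             xAxis.append(l)
--             yAxis.append(yAxisTemp[xAxisTemp.index(l)])
--             counter += 1
--
--     #must append yAxis and xAxis into a matrix to return a sigle list
--     mymatrix.append(yAxis)
--     mymatrix.append(xAxis)
--     return mymatrix
-- ===== SOURCE B (Python) =====
-- def consolidateEntries(xAxisTemp, yAxisTemp):
--     keys = list(dict.fromkeys(xAxisTemp))
--     pairs = list(zip(xAxisTemp, yAxisTemp))
--     vals = [sum(y for x, y in pairs if x == k) for k in keys]
--     return [vals, keys]
-- ===== Notes on version B (the rewrite author's own statement) =====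
-- stated objective: simpler
-- what changed: Replaced A's single incremental loop (growing parallel key/value lists updated in place via membership tests and list.index) by two staged passes with no running accumulator: an idiomatic first-appearance dedup of the keys, then a per-key summation comprehension over the zipped pairs.
import Mathlib
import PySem

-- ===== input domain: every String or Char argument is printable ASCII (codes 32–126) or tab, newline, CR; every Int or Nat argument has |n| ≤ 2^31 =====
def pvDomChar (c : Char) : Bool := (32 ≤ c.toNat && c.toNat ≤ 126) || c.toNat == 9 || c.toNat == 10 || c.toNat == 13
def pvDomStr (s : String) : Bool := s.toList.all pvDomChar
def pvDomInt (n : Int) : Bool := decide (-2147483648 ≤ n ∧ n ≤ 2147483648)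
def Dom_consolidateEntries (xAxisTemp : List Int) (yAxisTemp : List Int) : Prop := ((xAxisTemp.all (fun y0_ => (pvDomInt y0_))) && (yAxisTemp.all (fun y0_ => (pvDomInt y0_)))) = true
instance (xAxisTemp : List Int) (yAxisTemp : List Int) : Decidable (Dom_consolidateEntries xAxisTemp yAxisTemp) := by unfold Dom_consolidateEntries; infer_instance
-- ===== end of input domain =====

-- B replaces A's single incremental loop over parallel key/value lists by two staged
-- passes: a first-appearance dedup of the keys, then a per-key summation pass; return value only.

-- ===== PORT A =====
-- one iteration of A's loop body; state = (xAxis, yAxis, counter)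
def pvStepA (xAxisTemp yAxisTemp : List Int) (st : List Int × List Int × Int) (l : Int) :
    List Int × List Int × Int :=
  if l ∈ st.1 then
    let i : Nat := (PySem.List.index? st.1 l).getD 0
    let existingNum := PySem.List.pyGetD st.2.1 (i : Int) 0
    (st.1, st.2.1.set i (existingNum + PySem.List.pyGetD yAxisTemp st.2.2 0), st.2.2 + 1)
  else
    (st.1 ++ [l],
     st.2.1 ++ [PySem.List.pyGetD yAxisTemp (((PySem.List.index? xAxisTemp l).getD 0 : Nat) : Int) 0],
     st.2.2 + 1)

def consolidateEntries (xAxisTemp : List Int) (yAxisTemp : List Int) : List (List Int) :=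
  let yAxis : List Int := [PySem.List.pyGetD yAxisTemp 0 0]
  let xAxis : List Int := [PySem.List.pyGetD xAxisTemp 0 0]
  let st := (PySem.List.slice xAxisTemp (some 1) none).foldl
              (pvStepA xAxisTemp yAxisTemp) (xAxis, yAxis, 1)
  [st.2.1, st.1]

-- ===== PORT B =====
-- keys = list(dict.fromkeys(x)); pairs = list(zip(x, y)); vals = per-key sums; [vals, keys]
def consolidateEntries_alt (xAxisTemp : List Int) (yAxisTemp : List Int) : List (List Int) :=
  let keys := PySem.List.dedup xAxisTemp
  let pairs := List.zip xAxisTemp yAxisTemp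
  let vals := keys.map (fun k => ((pairs.filter (fun p => p.1 == k)).map Prod.snd).sum)
  [vals, keys]

-- ===== PRECONDITION & SPEC =====
-- A indexes yAxisTemp at positions 0 .. len(xAxisTemp)-1 and xAxisTemp at 0, so it raises
-- IndexError exactly when xAxisTemp is empty or yAxisTemp is shorter than xAxisTemp.
def Pre_consolidateEntries (xAxisTemp : List Int) (yAxisTemp : List Int) : Prop :=
  xAxisTemp ≠ [] ∧ xAxisTemp.length ≤ yAxisTemp.length
instance (xAxisTemp : List Int) (yAxisTemp : List Int) : Decidable (Pre_consolidateEntries xAxisTemp yAxisTemp) := by unfold Pre_consolidateEntries; infer_instance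

def pvWitness_consolidateEntries : List Int × List Int := ([1, 2, 1], [10, 20, 30])

def Spec_consolidateEntries (xAxisTemp : List Int) (yAxisTemp : List Int) (out : List (List Int)) : Prop := out = consolidateEntries_alt xAxisTemp yAxisTemp
instance (xAxisTemp : List Int) (yAxisTemp : List Int) (out : List (List Int)) : Decidable (Spec_consolidateEntries xAxisTemp yAxisTemp out) := by unfold Spec_consolidateEntries; infer_instance

-- ===== CLAIM (what is proved, stated in full; the proofs are below) =====
def Claim_equal_consolidateEntries : Prop := ∀ (xAxisTemp : List Int) (yAxisTemp : List Int), Dom_consolidateEntries xAxisTemp yAxisTemp → Pre_consolidateEntries xAxisTemp yAxisTemp → Spec_consolidateEntries xAxisTemp yAxisTemp (consolidateEntries xAxisTemp yAxisTemp)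


-- ===== LEMMAS AND PROOFS =====

-- proof-side middle man: the per-key-sum dict after the first k (x, y) pairs
def pvStepB (d : PySem.Dict Int Int) (p : Int × Int) : PySem.Dict Int Int :=
  d.insert p.1 (d.getD p.1 0 + p.2)

def pvDictAt (xs ys : List Int) (k : Nat) : PySem.Dict Int Int :=
  ((List.zip xs ys).take k).foldl pvStepB PySem.Dict.empty

-- replacing the (unique) entry keyed l leaves all other items untouched
theorem pvMapReplaceOfNotMem (items : List (Int × Int)) (l v : Int)
    (h : l ∉ items.map Prod.fst) :
    items.map (fun p => if p.1 == l then (l, v) else p) = items := by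
  induction items with
  | nil => rfl
  | cons a rest ih =>
      simp only [List.map_cons, List.mem_cons, not_or] at h ⊢
      rw [if_neg (by simp; exact fun e => h.1 e.symm), ih h.2]

-- dict-insert of an existing key, seen on the value column: a List.set at its index
theorem pvItemsSetSnd (items : List (Int × Int)) (l v : Int) (i : Nat)
    (hnd : (items.map Prod.fst).Nodup)
    (hi : PySem.List.index? (items.map Prod.fst) l = some i) :
    (items.map (fun p => if p.1 == l then (l, v) else p)).map Prod.snd
      = (items.map Prod.snd).set i v := by
  induction items generalizing i with
  | nil => simp [PySem.List.index?] at hi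
  | cons a rest ih =>
      obtain ⟨ak, aw⟩ := a
      simp only [List.map_cons, List.nodup_cons] at hnd
      by_cases hal : ak = l
      · rw [List.map_cons, hal, PySem.List.index?_cons_self] at hi
        obtain rfl : i = 0 := by simpa using hi.symm
        have hrest : l ∉ rest.map Prod.fst := hal ▸ hnd.1
        rw [List.map_cons, if_pos (by simp [hal]), List.map_cons,
          pvMapReplaceOfNotMem rest l v hrest]
        simp
      · rw [List.map_cons, PySem.List.index?_cons_of_ne _ hal] at hi
        obtain ⟨j, hj, rfl⟩ := Option.map_eq_some_iff.mp hi
        have hbeq : ((ak, aw).1 == l) = false := by simpa using hal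
        simp only [List.map_cons, hbeq, Bool.false_eq_true, if_false, List.set_cons_succ]
        rw [ih j hnd.2 hj]

-- looking a key up in the dict reads the value column at the key's index
theorem pvLookupSnd (items : List (Int × Int)) (l : Int) (i : Nat)
    (hi : PySem.List.index? (items.map Prod.fst) l = some i) :
    (PySem.Dict.mk items).getD l 0 = (items.map Prod.snd).getD i 0 := by
  induction items generalizing i with
  | nil => simp [PySem.List.index?] at hi
  | cons a rest ih =>
      obtain ⟨ak, aw⟩ := a
      by_cases hal : ak = l
      · rw [List.map_cons, hal, PySem.List.index?_cons_self] at hi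
        obtain rfl : i = 0 := by simpa using hi.symm
        simp [PySem.Dict.getD_eq_get?_getD, PySem.Dict.get?_mk_cons, hal]
      · rw [List.map_cons, PySem.List.index?_cons_of_ne _ hal] at hi
        obtain ⟨j, hj, rfl⟩ := Option.map_eq_some_iff.mp hi
        have := ih j hj
        simpa [PySem.Dict.getD_eq_get?_getD, PySem.Dict.get?_mk_cons, hal] using this

theorem pvKeysDictAt (xs ys : List Int) (h : xs.length ≤ ys.length) (k : Nat) :
    (pvDictAt xs ys k).keys = PySem.Set.ofList (xs.take k) := by
  have hk : pvDictAt xs ys k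
      = ((List.zip xs ys).take k).foldl
          (fun d x => d.insert x.1
            ((fun (d : PySem.Dict Int Int) (p : Int × Int) => d.getD p.1 0 + p.2) d x))
          PySem.Dict.empty := rfl
  rw [hk,
    PySem.Dict.keys_foldl_insert_key ((List.zip xs ys).take k) Prod.fst _ PySem.Dict.empty]
  rw [PySem.Dict.keys_empty, PySem.Set.update_nil_left, List.map_take,
    List.map_fst_zip h]

theorem pvNodupKeysDictAt (xs ys : List Int) (h : xs.length ≤ ys.length) (k : Nat) :
    (pvDictAt xs ys k).keys.Nodup := by
  rw [pvKeysDictAt xs ys h k]; exact PySem.Set.nodup_ofList _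

theorem pvDictAtSucc (xs ys : List Int) (h : xs.length ≤ ys.length) (k : Nat)
    (hk : k < xs.length) :
    pvDictAt xs ys (k + 1)
      = pvStepB (pvDictAt xs ys k) (xs[k]'hk, ys[k]'(lt_of_lt_of_le hk h)) := by
  have hz : k < (List.zip xs ys).length := by
    rw [List.length_zip]; omega
  rw [pvDictAt, List.take_add_one, List.getElem?_eq_getElem hz]
  simp only [Option.toList_some, List.foldl_append, List.foldl_cons, List.foldl_nil]
  rw [List.getElem_zip]
  rfl

-- inserting at an existing key, seen on the value column
theorem pvDictValuesSet (d : PySem.Dict Int Int) (l v : Int) (i : Nat)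
    (hnd : d.keys.Nodup) (hi : PySem.List.index? d.keys l = some i) :
    (d.insert l v).values = d.values.set i v := by
  obtain ⟨items⟩ := d
  have hm : l ∈ (PySem.Dict.mk items).keys :=
    (PySem.List.index?_isSome_iff _ _).mp (by rw [hi]; rfl)
  have hc : (PySem.Dict.mk items).contains l = true :=
    (PySem.Dict.contains_iff_mem_keys _ _).mpr hm
  show ((PySem.Dict.mk items).insert l v).items.map Prod.snd
      = (items.map Prod.snd).set i v
  rw [PySem.Dict.items_insert_of_contains _ v hc]
  exact pvItemsSetSnd items l v i hnd hi

theorem pvDictGetDIdx (d : PySem.Dict Int Int) (l : Int) (i : Nat)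
    (hi : PySem.List.index? d.keys l = some i) :
    d.getD l 0 = d.values.getD i 0 := by
  obtain ⟨items⟩ := d
  exact pvLookupSnd items l i hi

-- inserting a fresh key appends to the value column
theorem pvDictValuesAppend (d : PySem.Dict Int Int) (l v : Int)
    (hc : d.contains l = false) :
    (d.insert l v).values = d.values ++ [v] := by
  show (d.insert l v).items.map Prod.snd = d.items.map Prod.snd ++ [v]
  rw [PySem.Dict.items_insert_of_not_contains d v hc]
  simp

-- one step of A's loop advances the dict by one (x, y) pair
theorem pvStepBridge (xs ys : List Int) (h : xs.length ≤ ys.length) (k : Nat)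
    (hk : k < xs.length) :
    pvStepA xs ys ((pvDictAt xs ys k).keys, (pvDictAt xs ys k).values, (k : Int))
        (xs[k]'hk)
      = ((pvDictAt xs ys (k + 1)).keys, (pvDictAt xs ys (k + 1)).values,
         (k : Int) + 1) := by
  have hkys : k < ys.length := lt_of_lt_of_le hk h
  have hnd := pvNodupKeysDictAt xs ys h k
  have hkeys := pvKeysDictAt xs ys h k
  rw [pvDictAtSucc xs ys h k hk]
  set d := pvDictAt xs ys k with hd
  by_cases hmem : xs[k]'hk ∈ d.keys
  · -- existing key: in-place sum
    have hc : d.contains (xs[k]'hk) = true :=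
      (PySem.Dict.contains_iff_mem_keys _ _).mpr hmem
    obtain ⟨i, hi⟩ : ∃ i, PySem.List.index? d.keys (xs[k]'hk) = some i := by
      have := (PySem.List.index?_isSome_iff d.keys (xs[k]'hk)).mpr hmem
      exact Option.isSome_iff_exists.mp this
    simp only [pvStepA, pvStepB, if_pos hmem, hi, Option.getD_some]
    refine Prod.ext ?_ (Prod.ext ?_ rfl)
    · exact (PySem.Dict.keys_insert_of_contains d _ hc).symm
    · show d.values.set i
          (PySem.List.pyGetD d.values (i : Int) 0 + PySem.List.pyGetD ys (k : Int) 0)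
        = (d.insert (xs[k]'hk) (d.getD (xs[k]'hk) 0 + ys[k]'hkys)).values
      rw [PySem.List.pyGetD_natCast d.values i 0, PySem.List.pyGetD_natCast ys k 0,
        List.getD_eq_getElem ys 0 hkys, ← pvDictGetDIdx d _ i hi,
        pvDictValuesSet d _ _ i hnd hi]
  · -- fresh key: append
    have hc : d.contains (xs[k]'hk) = false := by
      rcases Bool.eq_false_or_eq_true (d.contains (xs[k]'hk)) with h1 | h0
      · exact absurd ((PySem.Dict.contains_iff_mem_keys _ _).mp h1) hmem
      · exact h0
    have hnotpre : xs[k]'hk ∉ xs.take k := by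
      intro hmemt
      exact hmem (hkeys ▸ (PySem.Set.mem_ofList _ _).mpr hmemt)
    have hidx : PySem.List.index? xs (xs[k]'hk) = some k := by
      rw [PySem.List.index?_eq_some_iff]
      exact ⟨xs.take k, xs.drop (k + 1),
        by rw [← List.drop_eq_getElem_cons hk, List.take_append_drop],
        List.length_take_of_le (le_of_lt hk), hnotpre⟩
    simp only [pvStepA, pvStepB, if_neg hmem, hidx, Option.getD_some]
    refine Prod.ext ?_ (Prod.ext ?_ rfl)
    · exact (PySem.Dict.keys_insert_of_not_contains d _ hc).symm
    · show d.values ++ [PySem.List.pyGetD ys (k : Int) 0]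
        = (d.insert (xs[k]'hk) (d.getD (xs[k]'hk) 0 + ys[k]'hkys)).values
      rw [PySem.Dict.getD_of_not_contains d 0 hc, zero_add,
        pvDictValuesAppend d _ _ hc, PySem.List.pyGetD_natCast ys k 0,
        List.getD_eq_getElem ys 0 hkys]

-- main loop invariant: A's state after counter = k is exactly (keys, values) of pvDictAt k
theorem pvInvA (xs ys : List Int) (h : xs.length ≤ ys.length) (k : Nat)
    (hk : k ≤ xs.length) :
    (xs.drop k).foldl (pvStepA xs ys)
        ((pvDictAt xs ys k).keys, (pvDictAt xs ys k).values, (k : Int))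
      = ((pvDictAt xs ys xs.length).keys, (pvDictAt xs ys xs.length).values,
         (xs.length : Int)) := by
  induction hm : xs.length - k generalizing k with
  | zero =>
      have hke : k = xs.length := by omega
      subst hke
      rw [List.drop_length, List.foldl_nil]
  | succ m ih =>
      have hklt : k < xs.length := by omega
      rw [List.drop_eq_getElem_cons hklt, List.foldl_cons,
        pvStepBridge xs ys h k hklt]
      have : ((k : Int) + 1) = ((k + 1 : Nat) : Int) := by push_cast; ring
      rw [this]
      exact ih (k + 1) (by omega) (by omega)

-- looking a key up in the pair-fold dict accumulates exactly the matching second components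
theorem pvGetDFold (pairs : List (Int × Int)) (d0 : PySem.Dict Int Int) (k : Int) :
    (pairs.foldl pvStepB d0).getD k 0
      = d0.getD k 0 + ((pairs.filter (fun p => p.1 == k)).map Prod.snd).sum := by
  induction pairs generalizing d0 with
  | nil => simp
  | cons p rest ih =>
      rw [List.foldl_cons, ih]
      rw [List.filter_cons]
      by_cases hpk : p.1 = k
      · simp only [hpk, BEq.rfl, if_true, List.map_cons, List.sum_cons,
          pvStepB, PySem.Dict.getD_insert]
        ring
      · have hf : (p.1 == k) = false := by simp [hpk]
        simp only [hf, Bool.false_eq_true, if_false,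
          pvStepB, PySem.Dict.getD_insert]
        rw [if_neg (fun e : k = p.1 => hpk e.symm)]

-- B's two staged passes produce exactly (values, keys) of the final dict
theorem pvAltAsDictAt (xs ys : List Int) (h : xs.length ≤ ys.length) :
    consolidateEntries_alt xs ys
      = [(pvDictAt xs ys xs.length).values, (pvDictAt xs ys xs.length).keys] := by
  have htake : (List.zip xs ys).take xs.length = List.zip xs ys := by
    apply List.take_of_length_le; rw [List.length_zip]; omega
  have hkeys : (pvDictAt xs ys xs.length).keys = PySem.List.dedup xs := by
    rw [pvKeysDictAt xs ys h xs.length, List.take_of_length_le (le_refl _),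
      PySem.List.dedup_eq_ofList]
  have hvals : (pvDictAt xs ys xs.length).values
      = (PySem.List.dedup xs).map
          (fun k => (((List.zip xs ys).filter (fun p => p.1 == k)).map Prod.snd).sum) := by
    rw [PySem.Dict.values_eq_map_keys _ (pvNodupKeysDictAt xs ys h xs.length) 0, hkeys]
    refine List.map_congr_left (fun k _ => ?_)
    rw [show pvDictAt xs ys xs.length = (List.zip xs ys).foldl pvStepB PySem.Dict.empty
        from by rw [pvDictAt, htake]]
    rw [pvGetDFold (List.zip xs ys) PySem.Dict.empty k]
    simp [PySem.Dict.getD_empty]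
  simp only [consolidateEntries_alt, hkeys, hvals]

-- ===== VERDICT (by name: the statement is the Claim_ definition above) =====
theorem consolidateEntries_spec : Claim_equal_consolidateEntries := by
  intro xs ys _ hpre
  obtain ⟨hne, hlen⟩ := hpre
  have hlen0 : 0 < xs.length := List.length_pos_iff.mpr hne
  have hys0 : 0 < ys.length := lt_of_lt_of_le hlen0 hlen
  unfold Spec_consolidateEntries
  rw [pvAltAsDictAt xs ys hlen]
  unfold consolidateEntries
  rw [PySem.List.slice_from xs (by norm_num : (0:Int) ≤ 1)]
  have hinit : (([PySem.List.pyGetD xs 0 0] : List Int),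
        ([PySem.List.pyGetD ys 0 0] : List Int), (1 : Int))
      = ((pvDictAt xs ys 1).keys, (pvDictAt xs ys 1).values, ((1 : Nat) : Int)) := by
    have h0 : pvDictAt xs ys 1 = pvStepB (pvDictAt xs ys 0) (xs[0]'hlen0, ys[0]'hys0) :=
      pvDictAtSucc xs ys hlen 0 hlen0
    have hd0 : pvDictAt xs ys 0 = PySem.Dict.empty := rfl
    rw [h0, hd0]
    refine Prod.ext ?_ (Prod.ext ?_ rfl)
    · show [PySem.List.pyGetD xs 0 0]
        = (PySem.Dict.empty.insert (xs[0]'hlen0) (PySem.Dict.empty.getD (xs[0]'hlen0) 0 + ys[0]'hys0)).keys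
      rw [PySem.Dict.keys_insert_of_not_contains _ _ (PySem.Dict.contains_empty _),
        PySem.Dict.keys_empty, PySem.List.pyGetD_ofNat' xs 0 0,
        List.getD_eq_getElem xs 0 hlen0]
      rfl
    · show [PySem.List.pyGetD ys 0 0]
        = (PySem.Dict.empty.insert (xs[0]'hlen0) (PySem.Dict.empty.getD (xs[0]'hlen0) 0 + ys[0]'hys0)).values
      rw [pvDictValuesAppend _ _ _ (PySem.Dict.contains_empty _)]
      simp [PySem.List.pyGetD_ofNat' ys 0 0, List.getElem?_eq_getElem hys0,
        PySem.Dict.values, PySem.Dict.empty]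
  show [(List.foldl (pvStepA xs ys)
      ([PySem.List.pyGetD xs 0 0], [PySem.List.pyGetD ys 0 0], 1) (xs.drop 1)).2.1,
    (List.foldl (pvStepA xs ys)
      ([PySem.List.pyGetD xs 0 0], [PySem.List.pyGetD ys 0 0], 1) (xs.drop 1)).1]
    = [(pvDictAt xs ys xs.length).values, (pvDictAt xs ys xs.length).keys]
  rw [show (([PySem.List.pyGetD xs 0 0] : List Int),
        ([PySem.List.pyGetD ys 0 0] : List Int), (1 : Int))
      = ((pvDictAt xs ys 1).keys, (pvDictAt xs ys 1).values, ((1 : Nat) : Int)) from hinit,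
    pvInvA xs ys hlen 1 hlen0]
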